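-- pv_equiv track=rewrite | github.com/yuriko-aya/lilia | mxl.py | dencode
-- ===== SOURCE A (Python) =====
-- consonant = ['b', 'c', 'd', 'f', 'g', 'h', 'j', 'k', 'l', 'm', 'n', 'p', 'q', 'r', 's', 't', 'v', 'w', 'x', 'y', 'z',]
--
-- vocals = ['a', 'i', 'u', 'e', 'o']
--
-- def swap_letters(letter,direction,letter_type):
--     if direction == 'decode':
--         step = len(letter_type)-7
--     else:
--         step = 7
--     return letter.replace(letter, (letter_type*3)[letter_type.index(letter)+step])
--
-- def dencode(message,direction='encode'):
--     chars = list(message.lower())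
--     encrypted_message = ''
--     for char in chars:
--         if char in vocals:
--             encrypted_message += swap_letters(char,direction,vocals)
--         elif char in consonant:
--             encrypted_message += swap_letters(char,direction,consonant)
--         else:
--             encrypted_message += char
--     return encrypted_message
-- ===== SOURCE B (Python) =====
-- consonant = ['b', 'c', 'd', 'f', 'g', 'h', 'j', 'k', 'l', 'm', 'n', 'p', 'q', 'r', 's', 't', 'v', 'w', 'x', 'y', 'z',]
--
-- vocals = ['a', 'i', 'u', 'e', 'o']
--
--
-- def dencode(message, direction='encode'):
--     # Precompute the full substitution table once, then do one uniform pass.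
--     table = {}
--     for letters in (vocals, consonant):
--         step = len(letters) - 7 if direction == 'decode' else 7
--         trip = letters * 3
--         for i, ch in enumerate(letters):
--             table[ch] = trip[i + step]
--     return ''.join(table.get(c, c) for c in message.lower())
-- ===== Notes on version B (the rewrite author's own statement) =====
-- stated objective: faster
-- what changed: B precomputes the complete 26-letter substitution table once (same tripled-list+step formula, step 7 for encode, len-7 for decode) and then produces the output in one uniform pass with table.get(c, c), removing A's per-character membership tests, if/elif branches and .index scans.
import Mathlib
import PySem

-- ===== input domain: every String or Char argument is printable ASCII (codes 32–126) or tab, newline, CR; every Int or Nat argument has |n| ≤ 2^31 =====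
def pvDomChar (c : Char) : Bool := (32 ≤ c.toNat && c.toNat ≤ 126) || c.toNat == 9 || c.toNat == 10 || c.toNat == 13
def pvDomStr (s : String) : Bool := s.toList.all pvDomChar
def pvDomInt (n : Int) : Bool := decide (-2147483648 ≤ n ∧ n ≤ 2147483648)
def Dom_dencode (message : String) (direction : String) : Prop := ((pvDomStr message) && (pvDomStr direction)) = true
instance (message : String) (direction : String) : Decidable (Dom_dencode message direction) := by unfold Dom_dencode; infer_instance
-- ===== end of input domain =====

-- B precomputes the whole substitution table once and maps it over the string in one
-- uniform pass, instead of A's per-character membership tests and .index scans.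

-- ===== PORT A =====
def vocalsP : List Char := ['a', 'i', 'u', 'e', 'o']

def consonantP : List Char :=
  ['b', 'c', 'd', 'f', 'g', 'h', 'j', 'k', 'l', 'm', 'n', 'p', 'q', 'r', 's', 't', 'v', 'w', 'x', 'y', 'z']

-- swap_letters; works on List Char (strings of length 1 in the Python).
-- The two `none` fallbacks are unreachable: callers only pass a letter that is a member
-- of letter_type, so `.index` succeeds and the tripled-list index is always in range.
def swapLettersP (letter : Char) (direction : String) (letterType : List Char) : List Char :=
  let step : Int := if direction == "decode" then (letterType.length : Int) - 7 else 7
  match PySem.List.index? letterType letter with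
  | some i =>
      match PySem.List.pyGet? (letterType ++ letterType ++ letterType) ((i : Int) + step) with
      | some c => PySem.Chars.replace [letter] [letter] [c]
      | none => [letter]
  | none => [letter]

def dencode (message : String) (direction : String) : String :=
  let chars := PySem.Chars.lower message.toList
  String.ofList (chars.foldl (fun acc char =>
    if char ∈ vocalsP then acc ++ swapLettersP char direction vocalsP
    else if char ∈ consonantP then acc ++ swapLettersP char direction consonantP
    else acc ++ [char]) [])

-- ===== PORT B =====
-- builds the table: for letters in (vocals, consonant): for i, ch in enumerate(letters): table[ch] = trip[i+step]
-- (the `.getD p.2` default is unreachable: i+step is always a valid (possibly negative) index into trip)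
def cipherTable (direction : String) : PySem.Dict Char Char :=
  [vocalsP, consonantP].foldl (fun table letters =>
    let step : Int := if direction == "decode" then (letters.length : Int) - 7 else 7
    let trip := letters ++ letters ++ letters
    (PySem.List.enumerate letters).foldl
      (fun table p => table.insert p.2 ((PySem.List.pyGet? trip (p.1 + step)).getD p.2)) table)
    PySem.Dict.empty

def dencode_alt (message : String) (direction : String) : String :=
  String.ofList ((PySem.Chars.lower message.toList).map
    (fun c => (cipherTable direction).getD c c))

-- ===== PRECONDITION & SPEC =====
def Spec_dencode (message : String) (direction : String) (out : String) : Prop := out = dencode_alt message direction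
instance (message : String) (direction : String) (out : String) : Decidable (Spec_dencode message direction out) := by unfold Spec_dencode; infer_instance

-- ===== CLAIM (what is proved, stated in full; the proofs are below) =====
def Claim_equal_dencode : Prop := ∀ (message : String) (direction : String), Dom_dencode message direction → Spec_dencode message direction (dencode message direction)

-- ===== LEMMAS AND PROOFS =====

-- lookup of a key absent from a literal dict falls through to the default
theorem getD_mk_not_key (pairs : List (Char × Char)) (c : Char)
    (h : c ∉ pairs.map Prod.fst) : (PySem.Dict.mk pairs).getD c c = c := by
  induction pairs with
  | nil => rfl
  | cons p ps ih =>
    simp only [List.map_cons, List.mem_cons, not_or] at h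
    simp only [PySem.Dict.getD, PySem.Dict.get?, List.find?] at ih ⊢
    rw [show (p.1 == c) = false from beq_eq_false_iff_ne.mpr (fun he => h.1 he.symm)]
    exact ih h.2

-- per-character agreement between A's branchy body and B's table lookup
theorem perChar (direction : String) (c : Char) :
    (if c ∈ vocalsP then swapLettersP c direction vocalsP
     else if c ∈ consonantP then swapLettersP c direction consonantP
     else [c]) = [(cipherTable direction).getD c c] := by
  cases hd : (direction == "decode") with
  | true =>
    by_cases hv : c ∈ vocalsP
    · simp only [vocalsP, List.mem_cons, List.not_mem_nil, or_false] at hv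
      rcases hv with rfl | rfl | rfl | rfl | rfl <;>
        simp only [cipherTable, swapLettersP, hd] <;> decide
    · by_cases hc : c ∈ consonantP
      · simp only [consonantP, List.mem_cons, List.not_mem_nil, or_false] at hc
        rcases hc with rfl|rfl|rfl|rfl|rfl|rfl|rfl|rfl|rfl|rfl|rfl|rfl|rfl|rfl|rfl|rfl|rfl|rfl|rfl|rfl|rfl <;>
          simp only [cipherTable, swapLettersP, hd] <;> decide
      · have htab : cipherTable direction = PySem.Dict.mk [('a', 'e'), ('i', 'o'), ('u', 'a'), ('e', 'i'), ('o', 'u'), ('b', 's'), ('c', 't'), ('d', 'v'), ('f', 'w'), ('g', 'x'), ('h', 'y'), ('j', 'z'), ('k', 'b'), ('l', 'c'), ('m', 'd'), ('n', 'f'), ('p', 'g'), ('q', 'h'), ('r', 'j'), ('s', 'k'), ('t', 'l'), ('v', 'm'), ('w', 'n'), ('x', 'p'), ('y', 'q'), ('z', 'r')] := by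
          simp only [cipherTable, hd]; decide
        rw [if_neg hv, if_neg hc, htab, getD_mk_not_key]
        intro hmem
        have hkeys : (([('a', 'e'), ('i', 'o'), ('u', 'a'), ('e', 'i'), ('o', 'u'), ('b', 's'), ('c', 't'), ('d', 'v'), ('f', 'w'), ('g', 'x'), ('h', 'y'), ('j', 'z'), ('k', 'b'), ('l', 'c'), ('m', 'd'), ('n', 'f'), ('p', 'g'), ('q', 'h'), ('r', 'j'), ('s', 'k'), ('t', 'l'), ('v', 'm'), ('w', 'n'), ('x', 'p'), ('y', 'q'), ('z', 'r')] : List (Char × Char))).map Prod.fst = vocalsP ++ consonantP := by decide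
        rw [hkeys] at hmem
        rcases List.mem_append.mp hmem with h | h
        · exact hv h
        · exact hc h
  | false =>
    by_cases hv : c ∈ vocalsP
    · simp only [vocalsP, List.mem_cons, List.not_mem_nil, or_false] at hv
      rcases hv with rfl | rfl | rfl | rfl | rfl <;>
        simp only [cipherTable, swapLettersP, hd] <;> decide
    · by_cases hc : c ∈ consonantP
      · simp only [consonantP, List.mem_cons, List.not_mem_nil, or_false] at hc
        rcases hc with rfl|rfl|rfl|rfl|rfl|rfl|rfl|rfl|rfl|rfl|rfl|rfl|rfl|rfl|rfl|rfl|rfl|rfl|rfl|rfl|rfl <;>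
          simp only [cipherTable, swapLettersP, hd] <;> decide
      · have htab : cipherTable direction = PySem.Dict.mk [('a', 'u'), ('i', 'e'), ('u', 'o'), ('e', 'a'), ('o', 'i'), ('b', 'k'), ('c', 'l'), ('d', 'm'), ('f', 'n'), ('g', 'p'), ('h', 'q'), ('j', 'r'), ('k', 's'), ('l', 't'), ('m', 'v'), ('n', 'w'), ('p', 'x'), ('q', 'y'), ('r', 'z'), ('s', 'b'), ('t', 'c'), ('v', 'd'), ('w', 'f'), ('x', 'g'), ('y', 'h'), ('z', 'j')] := by
          simp only [cipherTable, hd]; decide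
        rw [if_neg hv, if_neg hc, htab, getD_mk_not_key]
        intro hmem
        have hkeys : (([('a', 'u'), ('i', 'e'), ('u', 'o'), ('e', 'a'), ('o', 'i'), ('b', 'k'), ('c', 'l'), ('d', 'm'), ('f', 'n'), ('g', 'p'), ('h', 'q'), ('j', 'r'), ('k', 's'), ('l', 't'), ('m', 'v'), ('n', 'w'), ('p', 'x'), ('q', 'y'), ('r', 'z'), ('s', 'b'), ('t', 'c'), ('v', 'd'), ('w', 'f'), ('x', 'g'), ('y', 'h'), ('z', 'j')] : List (Char × Char))).map Prod.fst = vocalsP ++ consonantP := by decide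
        rw [hkeys] at hmem
        rcases List.mem_append.mp hmem with h | h
        · exact hv h
        · exact hc h

-- ===== VERDICT (by name: the statement is the Claim_ definition above) =====
theorem dencode_spec : Claim_equal_dencode := by
  intro message direction _
  unfold Spec_dencode dencode dencode_alt
  have hbody : (fun (acc : List Char) (char : Char) =>
      if char ∈ vocalsP then acc ++ swapLettersP char direction vocalsP
      else if char ∈ consonantP then acc ++ swapLettersP char direction consonantP
      else acc ++ [char])
      = fun acc char => acc ++ [(cipherTable direction).getD char char] := by
    funext acc char
    rw [← perChar direction char]
    split_ifs <;> rfl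
  simp only [hbody, PySem.List.foldl_append_singleton_eq_map, List.nil_append]
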